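-- pv_equiv track=rewrite | github.com/RBdgauger/truth_discord_bot | national_days_scraper.py | get_birthdays_output
-- ===== SOURCE A (Python) =====
-- def get_birthdays_output(finished_birthdays):
--     if len(finished_birthdays) != 0:
--         birthday_output = "Today is "
--         for i, birthday in enumerate(finished_birthdays):
--             if len(finished_birthdays) == 1:
--                 birthday_output += "{}".format(birthday)
--             elif i == len(finished_birthdays) - 2:
--                 birthday_output += "{}'s and ".format(birthday)
--             elif i == len(finished_birthdays) - 1:
--                 birthday_output += "{}'s ".format(birthday)
--             else:
--                 birthday_output += "{}'s, ".format(birthday)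
--         birthday_output += "birthday."
--         return birthday_output
--     else:
--         return ""
-- ===== SOURCE B (Python) =====
-- def get_birthdays_output(finished_birthdays):
--     if not finished_birthdays:
--         return ""
--     parts = [name + "'s" for name in finished_birthdays]
--     if len(parts) == 1:
--         body = parts[0]
--     else:
--         body = ", ".join(parts[:-1]) + " and " + parts[-1]
--     return "Today is " + body + " birthday."
-- ===== Notes on version B (the rewrite author's own statement) =====
-- stated objective: simpler
-- what changed: Replaces the per-index enumerate loop with four global-index branches by a slice-based ', '.join of possessive parts plus explicit last-element handling (join avoids repeated string += reallocation), and fixes the single-name output.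
-- intended difference: On one-element lists A returns "Today is Xbirthday." (missing the "'s" and the space), while B returns the intended "Today is X's birthday.". — e.g. on get_birthdays_output(["Bob"]): A returns "Today is Bobbirthday.", B returns "Today is Bob's birthday."
import Mathlib
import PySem

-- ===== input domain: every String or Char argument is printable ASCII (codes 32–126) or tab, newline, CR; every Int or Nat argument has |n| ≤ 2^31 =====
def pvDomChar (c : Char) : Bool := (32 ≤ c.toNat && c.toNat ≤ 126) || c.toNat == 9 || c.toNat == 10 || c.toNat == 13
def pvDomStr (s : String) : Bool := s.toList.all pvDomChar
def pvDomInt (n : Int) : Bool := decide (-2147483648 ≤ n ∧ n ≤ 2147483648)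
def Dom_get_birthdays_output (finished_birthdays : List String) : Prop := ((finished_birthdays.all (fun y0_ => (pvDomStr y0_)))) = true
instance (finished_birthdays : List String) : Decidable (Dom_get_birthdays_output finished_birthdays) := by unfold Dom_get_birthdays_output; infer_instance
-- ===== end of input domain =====

-- B replaces A's per-index enumerate branching by a slice-based ", ".join of possessive parts
-- with explicit last-element handling (objective: simpler); on one-element lists B returns the
-- intended "Today is X's birthday." where A returns "Today is Xbirthday." (see D_ below).


-- ===== PORT A =====
def get_birthdays_output (finished_birthdays : List String) : String :=
  if finished_birthdays.length ≠ 0 then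
    let birthday_output :=
      (PySem.List.enumerate finished_birthdays 0).foldl (fun acc p =>
        if finished_birthdays.length = 1 then acc ++ p.2
        else if p.1 = (finished_birthdays.length : Int) - 2 then acc ++ (p.2 ++ "'s and ")
        else if p.1 = (finished_birthdays.length : Int) - 1 then acc ++ (p.2 ++ "'s ")
        else acc ++ (p.2 ++ "'s, ")) "Today is "
    birthday_output ++ "birthday."
  else ""

-- ===== PORT B =====
def get_birthdays_output_alt (finished_birthdays : List String) : String :=
  if finished_birthdays = [] then ""
  else
    let parts := finished_birthdays.map (fun name => name ++ "'s")
    let body :=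
      if parts.length = 1 then PySem.List.pyGetD parts 0 ""      -- parts[0], guarded nonempty
      else PySem.Str.join ", " (PySem.List.slice parts none (some (-1))) ++ " and " ++
           PySem.List.pyGetD parts (-1) ""                       -- parts[-1], guarded nonempty
    "Today is " ++ body ++ " birthday."

-- ===== PRECONDITION & SPEC =====
-- On one-element lists A returns "Today is Xbirthday." (missing "'s" and the space),
-- while B returns the intended "Today is X's birthday.".
def D_get_birthdays_output (finished_birthdays : List String) : Prop :=
  finished_birthdays.length = 1
instance (finished_birthdays : List String) : Decidable (D_get_birthdays_output finished_birthdays) := by unfold D_get_birthdays_output; infer_instance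

def Spec_get_birthdays_output (finished_birthdays : List String) (out : String) : Prop := ¬ D_get_birthdays_output finished_birthdays → out = get_birthdays_output_alt finished_birthdays
instance (finished_birthdays : List String) (out : String) : Decidable (Spec_get_birthdays_output finished_birthdays out) := by unfold Spec_get_birthdays_output; infer_instance

def pvDiffWitness_get_birthdays_output : List String := ["Bob"]
def pvDiffWitnessOut_get_birthdays_output : String × String :=
  ("Today is Bobbirthday.", "Today is Bob's birthday.")

-- ===== CLAIM (what is proved, stated in full; the proofs are below) =====
def Claim_unchanged_get_birthdays_output : Prop := ∀ (finished_birthdays : List String), Dom_get_birthdays_output finished_birthdays → Spec_get_birthdays_output finished_birthdays (get_birthdays_output finished_birthdays)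
def Claim_changed_get_birthdays_output : Prop := Dom_get_birthdays_output (pvDiffWitness_get_birthdays_output) ∧ D_get_birthdays_output (pvDiffWitness_get_birthdays_output) ∧ get_birthdays_output (pvDiffWitness_get_birthdays_output) = pvDiffWitnessOut_get_birthdays_output.1 ∧ get_birthdays_output_alt (pvDiffWitness_get_birthdays_output) = pvDiffWitnessOut_get_birthdays_output.2 ∧ pvDiffWitnessOut_get_birthdays_output.1 ≠ pvDiffWitnessOut_get_birthdays_output.2
def Claim_exact_get_birthdays_output : Prop := ∀ (finished_birthdays : List String), Dom_get_birthdays_output finished_birthdays → D_get_birthdays_output finished_birthdays → get_birthdays_output finished_birthdays ≠ get_birthdays_output_alt finished_birthdays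

-- ===== LEMMAS AND PROOFS =====

-- folding 'acc += g x' over a list concatenates the pieces
theorem pv_foldl_strcat {α : Type} (l : List α) (g : α → String) (acc : String) :
    l.foldl (fun a x => a ++ g x) acc = acc ++ (l.map g).foldr (· ++ ·) "" := by
  induction l generalizing acc with
  | nil => simp
  | cons x xs ih => simp [ih, String.append_assoc]

-- sep.join (l ++ [x]) at the char level
theorem pv_charJoin_append_singleton (sep : List Char) (L : List (List Char)) (x : List Char) :
    PySem.Chars.join sep (L ++ [x]) = ((L.map (· ++ sep)).foldr (· ++ ·) []) ++ x := by
  induction L with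
  | nil => simp [PySem.Chars.join_singleton]
  | cons c L ih =>
    cases hL : L ++ [x] with
    | nil => simp at hL
    | cons y ys =>
      rw [List.cons_append, hL, PySem.Chars.join_cons_cons, ← hL, ih]
      simp

theorem pv_toList_foldr (l : List String) :
    ((l.foldr (· ++ ·) "").toList) = (l.map String.toList).foldr (· ++ ·) [] := by
  induction l with
  | nil => rfl
  | cons x xs ih => simp [ih]

theorem pv_foldr_base (M : List (List Char)) (C : List Char) (_h : C ≠ []) :
    M.foldr (· ++ ·) C = M.foldr (· ++ ·) [] ++ C := by
  induction M with
  | nil => simp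
  | cons x xs ih => simp [ih, List.append_assoc]

-- a list of length ≥ 2 ends in two elements
theorem pv_two_last {α : Type} (l : List α) (h : 2 ≤ l.length) :
    ∃ init a b, l = init ++ [a, b] := by
  rcases hr : l.reverse with _ | ⟨a, t⟩
  · simp [List.reverse_eq_nil_iff.mp hr] at h
  · rcases t with _ | ⟨b, r⟩
    · have : l = [a] := by simpa using congrArg List.reverse hr
      simp [this] at h
    · refine ⟨r.reverse, b, a, ?_⟩
      have := congrArg List.reverse hr
      simpa using this

-- the main agreement on lists init ++ [a, b]
theorem pv_main (init : List String) (a b : String) :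
    get_birthdays_output (init ++ [a, b]) = get_birthdays_output_alt (init ++ [a, b]) := by
  have hlen : (init ++ [a, b]).length = init.length + 2 := by simp
  -- A side
  have hA : get_birthdays_output (init ++ [a, b]) =
      "Today is " ++ (((PySem.List.enumerate (init ++ [a, b]) 0).map (fun p =>
        if (init ++ [a, b]).length = 1 then p.2
        else if p.1 = ((init ++ [a, b]).length : Int) - 2 then p.2 ++ "'s and "
        else if p.1 = ((init ++ [a, b]).length : Int) - 1 then p.2 ++ "'s "
        else p.2 ++ "'s, ")).foldr (· ++ ·) "") ++ "birthday." := by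
    unfold get_birthdays_output
    rw [if_pos (by simp [hlen])]
    have := pv_foldl_strcat (PySem.List.enumerate (init ++ [a, b]) 0)
      (fun p => if (init ++ [a, b]).length = 1 then p.2
        else if p.1 = ((init ++ [a, b]).length : Int) - 2 then p.2 ++ "'s and "
        else if p.1 = ((init ++ [a, b]).length : Int) - 1 then p.2 ++ "'s "
        else p.2 ++ "'s, ") "Today is "
    simp only at this ⊢
    rw [show (fun (acc : String) (p : Int × String) =>
        if (init ++ [a, b]).length = 1 then acc ++ p.2
        else if p.1 = ((init ++ [a, b]).length : Int) - 2 then acc ++ (p.2 ++ "'s and ")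
        else if p.1 = ((init ++ [a, b]).length : Int) - 1 then acc ++ (p.2 ++ "'s ")
        else acc ++ (p.2 ++ "'s, ")) = (fun acc p =>
          acc ++ (if (init ++ [a, b]).length = 1 then p.2
          else if p.1 = ((init ++ [a, b]).length : Int) - 2 then p.2 ++ "'s and "
          else if p.1 = ((init ++ [a, b]).length : Int) - 1 then p.2 ++ "'s "
          else p.2 ++ "'s, ")) from by
      funext acc p; split_ifs <;> rfl]
    rw [this]
  -- evaluate the enumerate map
  have henum : (PySem.List.enumerate (init ++ [a, b]) 0) =
      PySem.List.enumerate init 0 ++ [((init.length : Int), a), ((init.length : Int) + 1, b)] := by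
    rw [PySem.List.enumerate_append]
    simp [PySem.List.enumerate_cons, PySem.List.enumerate_nil]
  have hmap : ((PySem.List.enumerate (init ++ [a, b]) 0).map (fun p =>
        if (init ++ [a, b]).length = 1 then p.2
        else if p.1 = ((init ++ [a, b]).length : Int) - 2 then p.2 ++ "'s and "
        else if p.1 = ((init ++ [a, b]).length : Int) - 1 then p.2 ++ "'s "
        else p.2 ++ "'s, ")) =
      init.map (· ++ "'s, ") ++ [a ++ "'s and ", b ++ "'s "] := by
    rw [henum, List.map_append]
    congr 1
    · have h1 : ∀ p ∈ PySem.List.enumerate init 0, (fun (p : Int × String) =>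
          if (init ++ [a, b]).length = 1 then p.2
          else if p.1 = ((init ++ [a, b]).length : Int) - 2 then p.2 ++ "'s and "
          else if p.1 = ((init ++ [a, b]).length : Int) - 1 then p.2 ++ "'s "
          else p.2 ++ "'s, ") p = p.2 ++ "'s, " := by
        intro p hp
        rcases (PySem.List.mem_enumerate_iff init 0 p).mp hp with ⟨k, hk, rfl⟩
        simp only [hlen]
        rw [if_neg (by omega), if_neg (by push_cast; omega), if_neg (by push_cast; omega)]
      rw [List.map_congr_left h1,
        show (fun (p : Int × String) => p.2 ++ "'s, ")
          = ((· ++ "'s, ") ∘ (fun (p : Int × String) => p.2)) from rfl,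
        ← List.map_map, PySem.List.map_snd_enumerate]
    · simp only [List.map_cons, List.map_nil, hlen]
      rw [if_neg (by omega), if_pos (by push_cast; omega), if_neg (by omega),
        if_neg (by push_cast; omega), if_pos (by push_cast; omega)]
  -- B side
  have hB : get_birthdays_output_alt (init ++ [a, b]) =
      "Today is " ++ (PySem.Str.join ", " (init.map (· ++ "'s") ++ [a ++ "'s"]) ++ " and " ++
        (b ++ "'s")) ++ " birthday." := by
    unfold get_birthdays_output_alt
    rw [if_neg (by simp)]
    have hparts : (init ++ [a, b]).map (fun name => name ++ "'s") =
        (init.map (· ++ "'s") ++ [a ++ "'s"]) ++ [b ++ "'s"] := by simp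
    simp only [hparts]
    rw [if_neg (by simp)]
    rw [PySem.List.slice_to_neg_one, List.dropLast_concat,
      PySem.List.pyGetD_neg_one_append_singleton]
  rw [hA, hmap, hB]
  apply String.toList_inj.mp
  have e1 : ("'s, " : String).toList = ("'s" : String).toList ++ (", " : String).toList := rfl
  have e2 : ("'s and " : String).toList = ("'s" : String).toList ++ (" and " : String).toList := rfl
  have e3 : ("'s " : String).toList ++ ("birthday." : String).toList
      = ("'s" : String).toList ++ (" birthday." : String).toList := rfl
  simp only [String.toList_append, pv_toList_foldr, PySem.Str.toList_join, List.map_append,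
    List.map_map, List.map_cons, List.map_nil]
  rw [pv_charJoin_append_singleton]
  simp [pv_foldr_base, List.append_assoc, e2]
  congr 1
  apply List.map_congr_left
  intro s _
  simp [List.append_assoc]

-- ===== VERDICT (by name: the statement is the Claim_ definition above) =====
theorem get_birthdays_output_spec : Claim_unchanged_get_birthdays_output := by
  intro fb _ hD
  rcases fb with _ | ⟨x, t⟩
  · rfl
  · rcases t with _ | ⟨y, t⟩
    · exact absurd rfl hD
    · rcases pv_two_last (x :: y :: t) (by simp) with ⟨init, a, b, heq⟩
      rw [heq]
      exact pv_main init a b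

theorem get_birthdays_output_changed : Claim_changed_get_birthdays_output := by
  unfold Claim_changed_get_birthdays_output; decide

theorem get_birthdays_output_tight : Claim_exact_get_birthdays_output := by
  intro fb _ hD h
  unfold D_get_birthdays_output at hD
  rcases fb with _ | ⟨x, t⟩
  · simp at hD
  · rcases t with _ | ⟨y, t⟩
    · have hlen := congrArg (fun s => s.toList.length) h
      simp only [get_birthdays_output, get_birthdays_output_alt] at hlen
      norm_num [PySem.List.enumerate_cons, PySem.List.enumerate_nil, PySem.List.pyGetD,
        PySem.List.pyIdx?, PySem.List.pyGet?, PySem.Str.join] at hlen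
      exact absurd hlen (by decide)
    · simp at hD
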